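-- pv_equiv track=rewrite | github.com/jcnh01/Algorithm | 프로그래머스/3/12987. 숫자 게임/숫자 게임.py | solution
-- ===== SOURCE A (Python) =====
-- def solution(A, B):
--     answer = 0
--     A.sort()
--     B.sort()
--
--     st = [False] * len(B)
--     num = 0
--
--     for i in A :
--         one = i
--         for j in range(num, len(B)) :
--             if st[j] :
--                 continue
--             if B[j] > one :
--                 st[j] = True
--                 num = j
--                 answer += 1
--                 break
--
--     return answer
-- ===== SOURCE B (Python) =====
-- def solution(A, B):
--     # Two-pointer greedy over both sorted lists (sorts A and B in place, like the original).
--     A.sort()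
--     B.sort()
--     i = 0
--     count = 0
--     for b in B:
--         if i < len(A) and b > A[i]:
--             i += 1
--             count += 1
--     return count
-- ===== Notes on version B (the rewrite author's own statement) =====
-- stated objective: faster
-- what changed: Replaced the per-element inner scan over B (with a visited array and restart index) by a single two-pointer sweep over sorted B against sorted A.
import Mathlib
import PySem

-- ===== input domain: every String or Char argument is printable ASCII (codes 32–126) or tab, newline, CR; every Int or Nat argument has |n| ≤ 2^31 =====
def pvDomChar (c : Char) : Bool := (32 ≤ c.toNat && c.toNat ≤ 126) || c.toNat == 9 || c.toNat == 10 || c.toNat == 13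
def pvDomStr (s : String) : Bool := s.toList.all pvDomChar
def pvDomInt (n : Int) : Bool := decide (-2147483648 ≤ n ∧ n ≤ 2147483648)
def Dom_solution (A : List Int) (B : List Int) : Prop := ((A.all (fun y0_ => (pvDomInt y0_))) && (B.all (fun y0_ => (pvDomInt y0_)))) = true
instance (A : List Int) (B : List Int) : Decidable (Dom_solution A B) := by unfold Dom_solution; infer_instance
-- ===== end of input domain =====

-- B replaces A's per-element inner scan of B (visited array + restart index) by a single
-- two-pointer sweep over sorted B against sorted A; like A, B sorts both lists in place
-- (same side effect); the equivalence proved here is about the return value.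


-- ===== PORT A =====
-- inner 'for j in range(num, len(B))' loop; state (st, num, answer); indices j are always
-- in [0, len B), so List.getD/List.set are exact for Python's B[j] / st[j] here
def pvInnerA (SB : List Int) (one : Int) : List Bool → Int → Int → List Int → List Bool × Int × Int
  | st, num, ans, [] => (st, num, ans)
  | st, num, ans, j :: js =>
    if st.getD j.toNat false then pvInnerA SB one st num ans js
    else if one < SB.getD j.toNat 0 then (st.set j.toNat true, j, ans + 1)
    else pvInnerA SB one st num ans js

-- outer 'for i in A' loop
def pvOuterA (SB : List Int) : List Int → List Bool × Int × Int → List Bool × Int × Int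
  | [], s => s
  | a :: as, (st, num, ans) =>
    pvOuterA SB as (pvInnerA SB a st num ans (PySem.List.pyRange num (PySem.List.len SB) 1))

def solution (A : List Int) (B : List Int) : Int :=
  (pvOuterA (PySem.List.sorted B (fun x => x) false) (PySem.List.sorted A (fun x => x) false)
    (List.replicate (PySem.List.sorted B (fun x => x) false).length false, 0, 0)).2.2

-- ===== PORT B =====
def solution_alt (A : List Int) (B : List Int) : Int :=
  ((PySem.List.sorted B (fun x => x) false).foldl
    (fun (s : Int × Int) b =>
      if s.1 < PySem.List.len (PySem.List.sorted A (fun x => x) false) ∧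
         PySem.List.pyGetD (PySem.List.sorted A (fun x => x) false) s.1 0 < b
      then (s.1 + 1, s.2 + 1) else s)
    (0, 0)).2

-- ===== PRECONDITION & SPEC =====
def Spec_solution (A : List Int) (B : List Int) (out : Int) : Prop := out = solution_alt A B
instance (A : List Int) (B : List Int) (out : Int) : Decidable (Spec_solution A B out) := by unfold Spec_solution; infer_instance

-- ===== CLAIM (what is proved, stated in full; the proofs are below) =====
def Claim_equal_solution : Prop := ∀ (A : List Int) (B : List Int), Dom_solution A B → Spec_solution A B (solution A B)

-- ===== LEMMAS AND PROOFS =====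

-- common greedy count on two ascending lists: consume b's, matching each against the current a
def pvGo : List Int → List Int → Int
  | _, [] => 0
  | [], _ :: _ => 0
  | a :: as, b :: bs => if a < b then 1 + pvGo as bs else pvGo (a :: as) bs
lemma pvGo_nil_right (as : List Int) : pvGo as [] = 0 := by cases as <;> rfl
lemma pvGo_nil_left (bs : List Int) : pvGo [] bs = 0 := by cases bs <;> rfl
lemma pvGo_prefix (a : Int) (as : List Int) (pre bs : List Int)
    (h : ∀ b ∈ pre, ¬ a < b) : pvGo (a :: as) (pre ++ bs) = pvGo (a :: as) bs := by
  induction pre with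
  | nil => rfl
  | cons b pre ih =>
    have hb : ¬ a < b := h b (by simp)
    simp only [List.cons_append, pvGo, if_neg hb]
    exact ih (fun b hb' => h b (by simp [hb']))
lemma pvGo_zero (as bs : List Int) (h : ∀ a' ∈ as, ∀ b ∈ bs, ¬ a' < b) : pvGo as bs = 0 := by
  induction bs generalizing as with
  | nil => exact pvGo_nil_right as
  | cons b bs ih =>
    cases as with
    | nil => rfl
    | cons a as =>
      have hb : ¬ a < b := h a (by simp) b (by simp)
      simp only [pvGo, if_neg hb]
      exact ih _ (fun a' ha' b' hb' => h a' ha' b' (by simp [hb']))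

lemma pvInnerA_scan (SB : List Int) (a : Int) (st : List Bool) (num ans : Int) :
    ∀ (bs : List Int) (q : Nat), SB.drop q = bs →
    (∀ j : Nat, q ≤ j → st.getD j false = false) →
    pvInnerA SB a st num ans (PySem.List.pyRange (q : Int) (PySem.List.len SB) 1) =
      (if (bs.takeWhile (fun b => decide (b ≤ a))).length < bs.length
       then (st.set (q + (bs.takeWhile (fun b => decide (b ≤ a))).length) true,
             ((q + (bs.takeWhile (fun b => decide (b ≤ a))).length : Nat) : Int), ans + 1)
       else (st, num, ans)) := by
  intro bs
  induction bs with
  | nil =>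
    intro q hq hst
    have hqlen : SB.length ≤ q := by
      have h := congrArg List.length hq; simp at h; omega
    rw [PySem.List.len_eq, PySem.List.pyRange_one_eq_nil (by exact_mod_cast hqlen)]
    simp [pvInnerA]
  | cons b bs ih =>
    intro q hq hst
    have hql : q < SB.length := by
      by_contra h
      rw [List.drop_eq_nil_of_le (by omega)] at hq; cases hq
    have hdrop : SB.drop q = SB[q] :: SB.drop (q + 1) := List.drop_eq_getElem_cons hql
    have hb : SB[q] = b := by rw [hdrop] at hq; exact (List.cons.injEq _ _ _ _ ▸ hq).1
    have hbs : SB.drop (q + 1) = bs := by rw [hdrop] at hq; exact (List.cons.injEq _ _ _ _ ▸ hq).2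
    rw [PySem.List.len_eq, PySem.List.pyRange_one_cons (by exact_mod_cast hql)]
    have h1 : ((q : Int) + 1) = ((q + 1 : Nat) : Int) := by push_cast; ring
    rw [show pvInnerA SB a st num ans ((q:Int) :: PySem.List.pyRange ((q:Int)+1) SB.length 1) =
      (if st.getD (q:Int).toNat false then pvInnerA SB a st num ans (PySem.List.pyRange ((q:Int)+1) (SB.length:Int) 1)
       else if a < SB.getD (q:Int).toNat 0 then (st.set (q:Int).toNat true, (q:Int), ans + 1)
       else pvInnerA SB a st num ans (PySem.List.pyRange ((q:Int)+1) (SB.length:Int) 1)) from rfl]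
    have htn : ((q : Int)).toNat = q := Int.toNat_natCast q
    rw [htn, hst q le_rfl, if_neg (Bool.false_ne_true)]
    have hgd : SB.getD q 0 = b := by rw [List.getD_eq_getElem SB 0 hql, hb]
    by_cases hab : a < b
    · rw [if_pos (by rw [hgd]; exact hab)]
      rw [show (b :: bs).takeWhile (fun x => decide (x ≤ a)) = [] from by
        simp [show ¬ b ≤ a by omega]]
      simp
    · rw [if_neg (by rw [hgd]; exact hab)]
      rw [h1]
      rw [show ((SB.length : Int)) = PySem.List.len SB from (PySem.List.len_eq SB).symm]
      rw [ih (q+1) hbs (fun j hj => hst j (by omega))]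
      rw [show (b :: bs).takeWhile (fun x => decide (x ≤ a)) = b :: bs.takeWhile (fun x => decide (x ≤ a)) from by
        simp [show b ≤ a by omega]]
      simp only [List.length_cons]
      by_cases hlt : (bs.takeWhile (fun x => decide (x ≤ a))).length < bs.length
      · rw [if_pos hlt, if_pos (by omega)]
        have : q + 1 + (bs.takeWhile (fun x => decide (x ≤ a))).length
             = q + ((bs.takeWhile (fun x => decide (x ≤ a))).length + 1) := by omega
        rw [this]
      · rw [if_neg hlt, if_neg (by omega)]

lemma pvOuterA_go (SB : List Int) :
    ∀ (as : List Int) (st : List Bool) (num ans : Int) (p : Nat),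
    as.Pairwise (· ≤ ·) →
    st.length = SB.length →
    (∀ j : Nat, p ≤ j → st.getD j false = false) →
    (num = (p : Int) ∨ (num + 1 = (p : Int) ∧ st.getD num.toNat false = true ∧ 0 ≤ num)) →
    (pvOuterA SB as (st, num, ans)).2.2 = ans + pvGo as (SB.drop p) := by
  intro as
  induction as with
  | nil => intro st num ans p _ _ _ _; simp [pvOuterA, pvGo_nil_left]
  | cons a as ih =>
    intro st num ans p hpw hlen hfalse hnum
    rw [show pvOuterA SB (a :: as) (st, num, ans)
        = pvOuterA SB as (pvInnerA SB a st num ans (PySem.List.pyRange num (PySem.List.len SB) 1)) from rfl]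
    -- step 1: scanning from num equals scanning from p
    have hskip : pvInnerA SB a st num ans (PySem.List.pyRange num (PySem.List.len SB) 1)
        = pvInnerA SB a st num ans (PySem.List.pyRange (p : Int) (PySem.List.len SB) 1) := by
      rcases hnum with h | ⟨h1, h2, h3⟩
      · rw [h]
      · have hlt : num.toNat < st.length := by
          by_contra hc
          rw [List.getD_eq_default _ _ (by omega)] at h2; cases h2
        have hnum_lt : num < PySem.List.len SB := by
          rw [PySem.List.len_eq]; omega
        rw [PySem.List.len_eq] at hnum_lt ⊢
        rw [PySem.List.pyRange_one_cons hnum_lt]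
        rw [show pvInnerA SB a st num ans (num :: PySem.List.pyRange (num+1) (SB.length:Int) 1)
          = (if st.getD num.toNat false then pvInnerA SB a st num ans (PySem.List.pyRange (num+1) (SB.length:Int) 1)
             else if a < SB.getD num.toNat 0 then (st.set num.toNat true, num, ans + 1)
             else pvInnerA SB a st num ans (PySem.List.pyRange (num+1) (SB.length:Int) 1)) from rfl]
        rw [h2, if_pos rfl, h1]
    rw [hskip, pvInnerA_scan SB a st num ans (SB.drop p) p rfl hfalse]
    set bs := SB.drop p with hbs
    set t := bs.takeWhile (fun b => decide (b ≤ a)) with ht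
    by_cases hm : t.length < bs.length
    · -- match at k = p + t.length
      rw [if_pos hm]
      set k := p + t.length with hk
      have hklen : k < SB.length := by
        have : bs.length = SB.length - p := by rw [hbs]; simp
        omega
      -- decompose bs = t ++ b₀ :: rest
      have hsplit : t ++ bs.dropWhile (fun b => decide (b ≤ a)) = bs := List.takeWhile_append_dropWhile
      have hdlen : (bs.dropWhile (fun b => decide (b ≤ a))).length = bs.length - t.length := by
        have := congrArg List.length hsplit; simp at this; omega
      obtain ⟨b0, rest, hd⟩ : ∃ b0 rest, bs.dropWhile (fun b => decide (b ≤ a)) = b0 :: rest := by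
        cases hdw : bs.dropWhile (fun b => decide (b ≤ a)) with
        | nil => rw [hdw] at hdlen; simp at hdlen; omega
        | cons x xs => exact ⟨x, xs, rfl⟩
      have hb0 : a < b0 := by
        have h1 : (bs.dropWhile (fun b => decide (b ≤ a))).head? = some b0 := by rw [hd]; rfl
        have h2 := List.head?_dropWhile_not (fun b => decide (b ≤ a)) bs
        rw [h1] at h2; simp at h2; omega
      have hbs_eq : bs = t ++ b0 :: rest := by rw [← hsplit, hd]
      have hrest : rest = SB.drop (k + 1) := by
        have h1 : bs.drop (t.length + 1) = rest := by
          rw [hbs_eq, ← List.drop_drop, List.drop_left]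
          rfl
        rw [← h1, hbs, List.drop_drop]
        congr 1
      -- apply IH on as with the new state
      have hIH := ih (st.set k true) ((k : Nat) : Int) (ans + 1) (k + 1)
        (hpw.of_cons)
        (by simp [hlen])
        (by
          intro j hj
          rw [List.getD_eq_getD_getElem?, List.getElem?_set_ne (by omega),
              ← List.getD_eq_getD_getElem?]
          exact hfalse j (by omega))
        (by
          right
          refine ⟨by push_cast; ring, ?_, by positivity⟩
          rw [Int.toNat_natCast, List.getD_eq_getD_getElem?, List.getElem?_set_self (by omega)]
          rfl)
      rw [hIH]
      -- compute pvGo (a :: as) bs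
      have hgo : pvGo (a :: as) bs = 1 + pvGo as (SB.drop (k+1)) := by
        rw [hbs_eq, pvGo_prefix a as t (b0 :: rest)
          (fun b hb => by have := List.mem_takeWhile_imp hb; simp at this; omega)]
        rw [show pvGo (a :: as) (b0 :: rest) = if a < b0 then 1 + pvGo as rest else pvGo (a::as) rest from rfl]
        rw [if_pos hb0, hrest]
      rw [hgo]; ring
    · -- no match: t = bs, every element of bs is ≤ a
      rw [if_neg hm]
      have hteq : t = bs := by
        have hpre : t.length ≤ bs.length := by rw [ht]; exact (List.takeWhile_prefix _).length_le
        have := List.takeWhile_prefix (l := bs) (p := fun b => decide (b ≤ a))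
        exact List.IsPrefix.eq_of_length this (by omega)
      have hall : ∀ b ∈ bs, b ≤ a := by
        intro b hb
        have : b ∈ t := by rw [hteq]; exact hb
        have := List.mem_takeWhile_imp this; simpa using this
      have hIH := ih st num ans p hpw.of_cons hlen hfalse hnum
      rw [hIH]
      have h1 : pvGo (a :: as) bs = 0 := by
        apply pvGo_zero
        intro a' ha' b hb
        rcases List.mem_cons.mp ha' with rfl | ha'
        · have := hall b hb; omega
        · have h2 := hall b hb
          have h3 : a ≤ a' := (List.pairwise_cons.mp hpw).1 a' ha'
          omega
      have h2 : pvGo as bs = 0 := by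
        apply pvGo_zero
        intro a' ha' b hb
        have h2 := hall b hb
        have h3 : a ≤ a' := (List.pairwise_cons.mp hpw).1 a' ha'
        omega
      rw [h1, h2]

lemma pvFoldB (SA : List Int) :
    ∀ (bs : List Int) (i : Nat) (c : Int),
    (bs.foldl
      (fun (s : Int × Int) b =>
        if s.1 < PySem.List.len SA ∧ PySem.List.pyGetD SA s.1 0 < b then (s.1 + 1, s.2 + 1) else s)
      ((i : Int), c)).2 = c + pvGo (SA.drop i) bs := by
  intro bs
  induction bs with
  | nil =>
    intro i c
    cases h : SA.drop i <;> simp [pvGo]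
  | cons b bs ih =>
    intro i c
    rw [List.foldl_cons]
    have hlen : PySem.List.len SA = (SA.length : Int) := PySem.List.len_eq SA
    have hpg : PySem.List.pyGetD SA (i : Int) 0 = SA.getD i 0 := PySem.List.pyGetD_natCast SA i 0
    by_cases hi : i < SA.length
    · have hdrop : SA.drop i = SA[i] :: SA.drop (i + 1) := List.drop_eq_getElem_cons hi
      have hgetD : SA.getD i 0 = SA[i] := List.getD_eq_getElem SA 0 hi
      by_cases hb : SA[i] < b
      · rw [if_pos ⟨by show (i:Int) < PySem.List.len SA; rw [hlen]; exact_mod_cast hi, by rw [hpg, hgetD]; exact hb⟩]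
        have : ((i : Int) + 1) = ((i + 1 : Nat) : Int) := by push_cast; ring
        rw [this, ih (i+1) (c+1), hdrop]
        simp [pvGo, hb]; ring
      · rw [if_neg (by rw [hpg, hgetD]; tauto)]
        rw [ih i c, hdrop]
        simp [pvGo, hb]
    · have hdrop : SA.drop i = [] := List.drop_eq_nil_of_le (by omega)
      rw [if_neg (by rw [show ((i:Int),c).1 = (i:Int) from rfl, hlen]; push_cast; omega)]
      rw [ih i c, hdrop]
      have : pvGo [] bs = 0 := by cases bs <;> rfl
      simp [pvGo, this]

-- ===== VERDICT (by name: the statement is the Claim_ definition above) =====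
theorem solution_spec : Claim_equal_solution := by
  intro A B _
  unfold Spec_solution solution solution_alt
  have hA := PySem.List.sorted_pairwise (xs := A) (key := fun x => x)
  set SA := PySem.List.sorted A (fun x => x) false with hSA
  set SB := PySem.List.sorted B (fun x => x) false with hSB
  have hrepl : ∀ j : Nat, (0:Nat) ≤ j → (List.replicate SB.length false).getD j false = false := by
    intro j _
    rw [List.getD_eq_getD_getElem?, List.getElem?_replicate]
    split <;> rfl
  rw [pvOuterA_go SB SA (List.replicate SB.length false) 0 0 0
    (by simpa using hA) (by simp) hrepl (Or.inl (by norm_num))]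
  have hF := pvFoldB SA SB 0 0
  simp only [Nat.cast_zero] at hF
  rw [hF]
  simp
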